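-- pv_equiv track=rewrite | github.com/milanchodavadiya19/ColorFill-A-Strategic-Puzzle-Game | src/app.py | tiles
-- ===== SOURCE A (Python) =====
-- def tiles(n, colors, board):
--     # create a new array
--     dct = {}
--     for i, j in [(i, j) for i in range(n) for j in range(n)]:
--         idx = (i * n) + j
--         dct[(i, j)] = str(colors[idx])
--     for key, value in dct.items():
--         x, y = key
--         board[x][y] = value
--         origin = board[0][0]
--     return board, origin
-- ===== SOURCE B (Python) =====
-- def tiles(n, colors, board):
--     # Stream the colors with one iterator instead of A's dict keyed by (i, j)
--     # index arithmetic; writes the rows of `board` in place like A does.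
--     it = iter(colors)
--     for i in range(n):
--         row = board[i]
--         for j in range(n):
--             row[j] = str(next(it))
--         origin = board[0][0]
--     return board, origin
-- ===== Notes on version B (the rewrite author's own statement) =====
-- stated objective: alternative
-- what changed: Replaces A's dict of (i,j)->color built with i*n+j index arithmetic plus a second items() pass with a single sequential stream: B pulls colors one by one from an iterator and writes each board row in place, with no dict and no flat-index computation.
import Mathlib
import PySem

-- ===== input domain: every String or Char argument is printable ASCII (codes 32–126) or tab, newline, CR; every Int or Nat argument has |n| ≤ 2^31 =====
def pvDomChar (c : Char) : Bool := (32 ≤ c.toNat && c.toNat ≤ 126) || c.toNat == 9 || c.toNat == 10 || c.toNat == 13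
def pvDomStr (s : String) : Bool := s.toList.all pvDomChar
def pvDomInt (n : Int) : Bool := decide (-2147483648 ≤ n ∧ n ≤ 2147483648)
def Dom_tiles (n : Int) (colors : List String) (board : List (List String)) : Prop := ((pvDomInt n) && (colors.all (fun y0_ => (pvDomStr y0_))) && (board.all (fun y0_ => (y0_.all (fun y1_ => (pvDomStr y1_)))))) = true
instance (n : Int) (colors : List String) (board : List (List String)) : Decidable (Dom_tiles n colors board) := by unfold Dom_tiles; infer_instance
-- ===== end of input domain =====

-- B drops A's dict keyed by (i,j) index arithmetic and instead streams the colors with a single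
-- iterator, writing each row of `board` in place as A does (alternative decomposition); the
-- equivalence proved is about the RETURN value (both mutate `board` the same way on Pre_).
-- (`str(...)` on the String-typed elements of `colors` is the identity and is ported as such in both ports.)

-- ===== PORT A =====
def tiles (n : Int) (colors : List String) (board : List (List String)) : List (List String) × String :=
  -- dct = {}; for i, j in [(i,j) for i in range(n) for j in range(n)]: dct[(i,j)] = str(colors[(i*n)+j])
  let pairs : List (Int × Int) :=
    (PySem.List.pyRange 0 n 1).flatMap (fun i => (PySem.List.pyRange 0 n 1).map (fun j => (i, j)))
  let dct : PySem.Dict (Int × Int) String :=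
    pairs.foldl (fun d p => d.insert p (PySem.List.pyGetD colors (p.1 * n + p.2) "")) PySem.Dict.empty
  -- for key, value in dct.items(): x, y = key; board[x][y] = value; origin = board[0][0]
  dct.items.foldl
    (fun st kv =>
      (PySem.List.pySetD st.1 kv.1.1
         (PySem.List.pySetD (PySem.List.pyGetD st.1 kv.1.1 []) kv.1.2 kv.2),
       PySem.List.pyGetD
         (PySem.List.pyGetD
           (PySem.List.pySetD st.1 kv.1.1
             (PySem.List.pySetD (PySem.List.pyGetD st.1 kv.1.1 []) kv.1.2 kv.2)) 0 []) 0 ""))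
    (board, "")  -- "" is the unreachable initial `origin` (Pre_ guarantees the loop body runs)

-- ===== PORT B =====
-- row = board[i]; for j in range(n): row[j] = str(next(it))  — `row` aliases board[i], so the
-- mutated row is written back into the board (one pySetD at the row index); next(it) on the
-- exhausted iterator raises in Python (outside Pre_), rendered by headD ""/tail here.
def tilesAltStep (n : Int) (st : List (List String) × List String) (i : Int) :
    List (List String) × List String :=
  (PySem.List.pySetD st.1 i
     (((PySem.List.pyRange 0 n 1).foldl
        (fun s j => (PySem.List.pySetD s.1 j (s.2.headD ""), s.2.tail))
        (PySem.List.pyGetD st.1 i [], st.2)).1),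
   ((PySem.List.pyRange 0 n 1).foldl
      (fun s j => (PySem.List.pySetD s.1 j (s.2.headD ""), s.2.tail))
      (PySem.List.pyGetD st.1 i [], st.2)).2)

-- origin = board[0][0]
def tilesAltOrigin (st : List (List String) × List String) : String :=
  PySem.List.pyGetD (PySem.List.pyGetD st.1 0 []) 0 ""

def tiles_alt (n : Int) (colors : List String) (board : List (List String)) : List (List String) × String :=
  -- it = iter(colors); for i in range(n): …; return board, origin
  let st := (PySem.List.pyRange 0 n 1).foldl
    (fun st i => (tilesAltStep n st.1 i, tilesAltOrigin (tilesAltStep n st.1 i)))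
    ((board, colors), "")  -- "" is the unreachable initial `origin` (Pre_ guarantees the loop body runs)
  (st.1.1, st.2)

-- ===== PRECONDITION & SPEC =====
-- Pre_ is exactly where the Python A returns: n ≥ 1 (n ≤ 0 leaves `origin` unbound → UnboundLocalError),
-- colors long enough for all n*n reads (else IndexError), and board at least n×n (else IndexError on assignment).
def Pre_tiles (n : Int) (colors : List String) (board : List (List String)) : Prop :=
  1 ≤ n ∧ n * n ≤ (colors.length : Int) ∧ n ≤ (board.length : Int) ∧
    ∀ r ∈ board.take n.toNat, n ≤ (r.length : Int)
instance (n : Int) (colors : List String) (board : List (List String)) : Decidable (Pre_tiles n colors board) := by unfold Pre_tiles; infer_instance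
def pvWitness_tiles : Int × List String × List (List String) :=
  (2, ["r", "g", "b", "y"], [["?", "?"], ["?", "?"]])

def Spec_tiles (n : Int) (colors : List String) (board : List (List String)) (out : List (List String) × String) : Prop := out = tiles_alt n colors board
instance (n : Int) (colors : List String) (board : List (List String)) (out : List (List String) × String) : Decidable (Spec_tiles n colors board out) := by unfold Spec_tiles; infer_instance

-- ===== CLAIM (what is proved, stated in full; the proofs are below) =====
def Claim_equal_tiles : Prop := ∀ (n : Int) (colors : List String) (board : List (List String)), Dom_tiles n colors board → Pre_tiles n colors board → Spec_tiles n colors board (tiles n colors board)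

-- ===== LEMMAS AND PROOFS =====

theorem pyRange_cast (m : Nat) : PySem.List.pyRange 0 (m:Int) 1 = (List.range m).map (fun (k : Nat) => (k:Int)) := by
  rw [PySem.List.pyRange_one]; simp

theorem self_pairs_nodup {α : Type} [DecidableEq α] (L : List α) (h : L.Nodup) :
    (L.flatMap (fun i => L.map (fun j => (i, j)))).Nodup := by
  have := List.Nodup.product h h
  simpa [List.product, SProd.sprod] using this

-- a loop that recomputes its second accumulator from the first at every step
theorem foldl_pair_recomp {γ β β' : Type} (g : β → γ → β) (h : β → β') :
    ∀ (l : List γ) (b0 : β) (o0 : β'), l ≠ [] →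
      l.foldl (fun st kv => (g st.1 kv, h (g st.1 kv))) (b0, o0) = (l.foldl g b0, h (l.foldl g b0)) := by
  intro l
  induction l with
  | nil => simp
  | cons x xs ih =>
    intro b0 o0 _
    cases xs with
    | nil => simp
    | cons y ys => simpa using ih (g b0 x) (h (g b0 x)) (by simp)

-- assigning columns 0..m-1 of one row in order
theorem rowfold (m : Nat) (f : Nat → String) :
    ∀ (r : List String), m ≤ r.length →
      (List.range m).foldl (fun r j => r.set j (f j)) r = (List.range m).map f ++ r.drop m := by
  induction m with
  | zero => simp
  | succ m ih =>
    intro r hr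
    rw [List.range_succ, List.foldl_append, ih r (by omega), List.map_append]
    have hm : m < r.length := by omega
    simp only [List.foldl_cons, List.foldl_nil]
    rw [List.set_append_right _ _ (by simp), List.length_map, List.length_range, Nat.sub_self,
        List.drop_eq_getElem_cons hm, List.set_cons_zero]
    simp

-- the inner column loop touches only row i of the board
theorem boardfold_row (i : Nat) (f : Nat → String) (m : Nat) :
    ∀ (b : List (List String)) (r : List String), i < b.length →
      (List.range m).foldl (fun b j => b.set i ((b.getD i []).set j (f j))) (b.set i r)
        = b.set i ((List.range m).foldl (fun r j => r.set j (f j)) r) := by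
  induction m with
  | zero => simp
  | succ m ih =>
    intro b r hi
    rw [List.range_succ, List.foldl_append, List.foldl_append, ih b r hi]
    simp only [List.foldl_cons, List.foldl_nil]
    have hget : ((b.set i ((List.range m).foldl (fun r j => r.set j (f j)) r)).getD i []) =
        (List.range m).foldl (fun r j => r.set j (f j)) r := by
      rw [List.getD_eq_getElem _ _ (by simpa using hi)]
      simp
    rw [hget, List.set_set]

-- the whole row-major assignment loop, row by row
theorem boardfold (m : Nat) (f : Nat → Nat → String) (board : List (List String))
    (hlen : m ≤ board.length) (hrow : ∀ i < m, m ≤ (board.getD i []).length) :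
    ∀ k ≤ m,
      (List.range k).foldl
        (fun b i => (List.range m).foldl (fun b j => b.set i ((b.getD i []).set j (f i j))) b) board
      = (List.range k).map (fun i => (List.range m).map (f i) ++ (board.getD i []).drop m)
          ++ board.drop k := by
  intro k
  induction k with
  | zero => simp
  | succ k ih =>
    intro hk
    conv_lhs => rw [List.range_succ, List.foldl_append, ih (by omega)]
    simp only [List.foldl_cons, List.foldl_nil]
    set B := (List.range k).map (fun i => (List.range m).map (f i) ++ (board.getD i []).drop m)
          ++ board.drop k with hB
    have hkb : k < board.length := by omega
    have hBlen : B.length = board.length := by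
      simp [hB]; omega
    have hkB : k < B.length := by omega
    have hgetB : B.getD k [] = board.getD k [] := by
      rw [List.getD_eq_getElem _ _ hkB, List.getD_eq_getElem _ _ hkb]
      simp only [hB]
      rw [List.getElem_append_right (by simp)]
      simp
    have hsetB : B = B.set k (B.getD k []) := by
      rw [List.getD_eq_getElem _ _ hkB, List.set_getElem_self]
    calc (List.range m).foldl (fun b j => b.set k ((b.getD k []).set j (f k j))) B
        = (List.range m).foldl (fun b j => b.set k ((b.getD k []).set j (f k j))) (B.set k (B.getD k [])) := by rw [← hsetB]
      _ = B.set k ((List.range m).foldl (fun r j => r.set j (f k j)) (B.getD k [])) := boardfold_row k (f k) m B (B.getD k []) hkB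
      _ = B.set k ((List.range m).map (f k) ++ (board.getD k []).drop m) := by
            rw [hgetB, rowfold m (f k) (board.getD k []) (hrow k (by omega))]
      _ = (List.range (k+1)).map (fun i => (List.range m).map (f i) ++ (board.getD i []).drop m)
            ++ board.drop (k+1) := by
            rw [List.range_succ, List.map_append, hB,
                List.set_append_right _ _ (by simp)]
            simp only [List.length_map, List.length_range, Nat.sub_self]
            rw [List.drop_eq_getElem_cons hkb, List.set_cons_zero]
            simp

-- B's inner loop: consume the stream m times, filling columns 0..m-1 of one row
theorem innerfold (m : Nat) :
    ∀ (r rest : List String), m ≤ r.length →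
      (List.range m).foldl
        (fun (s : List String × List String) j => (s.1.set j (s.2.headD ""), s.2.tail)) (r, rest)
      = ((List.range m).map (fun j => (rest.drop j).headD "") ++ r.drop m, rest.drop m) := by
  induction m with
  | zero => simp
  | succ m ih =>
    intro r rest hr
    rw [List.range_succ, List.foldl_append, ih r rest (by omega)]
    simp only [List.foldl_cons, List.foldl_nil, List.map_append, List.map_cons, List.map_nil]
    have hm : m < r.length := by omega
    rw [List.set_append_right _ _ (by simp), List.length_map, List.length_range, Nat.sub_self,
        List.drop_eq_getElem_cons hm, List.set_cons_zero, List.tail_drop]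
    simp

-- B's outer loop: after k rows the stream has advanced by k*m and rows 0..k-1 are written
theorem outerfold (m : Nat) (colors : List String) (board : List (List String))
    (hlen : m ≤ board.length) (hrow : ∀ i < m, m ≤ (board.getD i []).length) :
    ∀ k ≤ m,
      (List.range k).foldl
        (fun (st : List (List String) × List String) i =>
          (st.1.set i (((List.range m).foldl
              (fun (s : List String × List String) j => (s.1.set j (s.2.headD ""), s.2.tail))
              (st.1.getD i [], st.2)).1),
           ((List.range m).foldl
              (fun (s : List String × List String) j => (s.1.set j (s.2.headD ""), s.2.tail))
              (st.1.getD i [], st.2)).2))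
        (board, colors)
      = ((List.range k).map (fun i =>
            (List.range m).map (fun j => ((colors.drop (i * m)).drop j).headD "")
              ++ (board.getD i []).drop m) ++ board.drop k,
         colors.drop (k * m)) := by
  intro k
  induction k with
  | zero => simp
  | succ k ih =>
    intro hk
    conv_lhs => rw [List.range_succ, List.foldl_append, ih (by omega)]
    simp only [List.foldl_cons, List.foldl_nil]
    set B := (List.range k).map (fun i =>
        (List.range m).map (fun j => ((colors.drop (i * m)).drop j).headD "")
          ++ (board.getD i []).drop m) ++ board.drop k with hB
    have hkb : k < board.length := by omega
    have hBlen : B.length = board.length := by simp [hB]; omega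
    have hkB : k < B.length := by omega
    have hgetB : B.getD k [] = board.getD k [] := by
      rw [List.getD_eq_getElem _ _ hkB, List.getD_eq_getElem _ _ hkb]
      simp only [hB]
      rw [List.getElem_append_right (by simp)]
      simp
    rw [hgetB, innerfold m (board.getD k []) (colors.drop (k * m)) (hrow k (by omega)),
        List.drop_drop]
    dsimp only
    rw [show k * m + m = (k + 1) * m from by ring]
    rw [List.range_succ, List.map_append]
    simp only [List.map_cons, List.map_nil]
    rw [hB, List.set_append_right _ _ (by simp), List.length_map, List.length_range, Nat.sub_self,
        List.drop_eq_getElem_cons hkb, List.set_cons_zero]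
    simp

-- the streamed value at row i, column j is colors[i*m+j]
theorem headD_drop_getD (l : List String) (d : Nat) :
    (l.drop d).headD "" = l.getD d "" := by
  rw [List.headD_eq_head?, List.head?_drop, List.getD_eq_getElem?_getD]

-- ===== VERDICT (by name: the statement is the Claim_ definition above) =====
theorem tiles_spec : Claim_equal_tiles := by
  intro n colors board _hdom hpre
  obtain ⟨h1, h2, h3, h4⟩ := hpre
  obtain ⟨m, rfl⟩ : ∃ m : Nat, n = (m : Int) := ⟨n.toNat, by omega⟩
  have hm1 : 1 ≤ m := by exact_mod_cast h1
  have hlen : m ≤ board.length := by exact_mod_cast h3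
  have hrow : ∀ i < m, m ≤ (board.getD i []).length := by
    intro i hi
    have hib : i < board.length := by omega
    have hmem : board[i] ∈ board.take m := by
      have : (board.take m)[i]'(by simp; omega) = board[i] := List.getElem_take
      exact this ▸ List.getElem_mem _
    have := h4 _ hmem
    rw [List.getD_eq_getElem _ _ hib]
    simpa [Int.toNat_natCast] using this
  show tiles _ _ _ = tiles_alt _ _ _
  unfold tiles tiles_alt
  simp only [pyRange_cast]
  -- ---- A side: reduce to the indexed normal form N ----
  have hcastinj : ((List.range m).map (fun (k : Nat) => (k:Int))).Nodup :=
    List.Nodup.map (fun a b h => by exact_mod_cast h) List.nodup_range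
  set L : List Int := (List.range m).map (fun (k : Nat) => (k:Int)) with hL
  set pairs : List (Int × Int) := L.flatMap (fun i => L.map (fun j => (i, j))) with hpairs
  set v : Int × Int → String := fun p => PySem.List.pyGetD colors (p.1 * (m:Int) + p.2) "" with hv
  have hnodup : pairs.Nodup := self_pairs_nodup L hcastinj
  have hitems : (pairs.foldl (fun d p => d.insert p (v p)) PySem.Dict.empty).items
      = pairs.map (fun p => (p, v p)) := by
    rw [PySem.Dict.items_foldl_insert_fresh pairs (fun p => p) v PySem.Dict.empty
        (fun a _ => PySem.Dict.contains_empty a) (by simpa using hnodup)]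
    rfl
  rw [hitems]
  have hmem00 : ((0:Int), (0:Int)) ∈ pairs := by
    have h0L : (0:Int) ∈ L := by
      rw [hL]; exact List.mem_map.mpr ⟨0, List.mem_range.mpr (by omega), rfl⟩
    rw [hpairs]
    exact List.mem_flatMap.mpr ⟨0, h0L, List.mem_map.mpr ⟨0, h0L, rfl⟩⟩
  have hne : pairs.map (fun p => (p, v p)) ≠ [] :=
    List.ne_nil_of_length_pos (by simpa using List.length_pos_of_mem hmem00)
  rw [foldl_pair_recomp
        (fun b kv => PySem.List.pySetD b kv.1.1
          (PySem.List.pySetD (PySem.List.pyGetD b kv.1.1 []) kv.1.2 kv.2))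
        (fun b => PySem.List.pyGetD (PySem.List.pyGetD b 0 []) 0 "")
        (pairs.map (fun p => (p, v p))) board "" hne]
  have hfold : (pairs.map (fun p => (p, v p))).foldl
      (fun b kv => PySem.List.pySetD b kv.1.1
        (PySem.List.pySetD (PySem.List.pyGetD b kv.1.1 []) kv.1.2 kv.2)) board
      = (List.range m).map (fun (i : Nat) => (List.range m).map
            (fun (j : Nat) => PySem.List.pyGetD colors ((i:Int) * (m:Int) + (j:Int)) "")
            ++ (board.getD i []).drop m) ++ board.drop m := by
    rw [List.foldl_map, hpairs, List.foldl_flatMap, hL]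
    simp only [List.foldl_map, List.map_map, Function.comp, hv,
      PySem.List.pySetD_natCast, PySem.List.pyGetD_natCast]
    exact boardfold m _ board hlen hrow m le_rfl
  rw [hfold]
  -- ---- B side: the streaming loop reaches the same normal form ----
  have hLne : L ≠ [] := by
    rw [hL]
    intro h
    have := congrArg List.length h
    simp at this
    omega
  rw [foldl_pair_recomp (tilesAltStep (m:Int)) tilesAltOrigin L ((board, colors)) "" hLne]
  have hfoldB : L.foldl (tilesAltStep (m:Int)) (board, colors)
      = ((List.range m).map (fun i =>
            (List.range m).map (fun j => ((colors.drop (i * m)).drop j).headD "")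
              ++ (board.getD i []).drop m) ++ board.drop m,
         colors.drop (m * m)) := by
    rw [hL, List.foldl_map]
    simp only [tilesAltStep, pyRange_cast, List.foldl_map, PySem.List.pySetD_natCast,
      PySem.List.pyGetD_natCast]
    exact outerfold m colors board hlen hrow m le_rfl
  rw [hfoldB]
  have hrows : (List.range m).map (fun i =>
        (List.range m).map (fun j => ((colors.drop (i * m)).drop j).headD "")
          ++ (board.getD i []).drop m)
      = (List.range m).map (fun (i : Nat) => (List.range m).map
            (fun (j : Nat) => PySem.List.pyGetD colors ((i:Int) * (m:Int) + (j:Int)) "")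
            ++ (board.getD i []).drop m) := by
    apply List.map_congr_left
    intro i _
    congr 1
    apply List.map_congr_left
    intro j _
    rw [List.drop_drop, headD_drop_getD]
    have : (i:Int) * (m:Int) + (j:Int) = ((j + i * m : Nat) : Int) := by push_cast; ring
    rw [this, PySem.List.pyGetD_natCast]
    congr 1
    omega
  simp only [tilesAltOrigin, hrows]
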